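-- pv_equiv track=rewrite | github.com/nour29110/Genome-Assembly-via-de-Bruijn-Graphs | week2_Assembling Genomes Using de Bruijn Graphs/1-puzzle-assembly/puzzle_assembly.py | backtrack
-- ===== SOURCE A (Python) =====
-- def valid_piece(piece, r, c, n, board):
--     # piece is a tuple: (up, left, down, right)
--     # Check border conditions:
--     if r == 0 and piece[0] != "black":
--         return False
--     if r == n-1 and piece[2] != "black":
--         return False
--     if c == 0 and piece[1] != "black":
--         return False
--     if c == n-1 and piece[3] != "black":
--         return False
--     # Check adjacent neighbors:
--     # Check left neighbor: its right edge must match this piece's left edge.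
--     if c > 0:
--         left_piece = board[r][c-1]
--         if left_piece[3] != piece[1]:
--             return False
--     # Check top neighbor: its down edge must match this piece's up edge.
--     if r > 0:
--         top_piece = board[r-1][c]
--         if top_piece[2] != piece[0]:
--             return False
--     return True
--
-- def backtrack(pos, n, pieces, used, board):
--     if pos == n * n:
--         return True
--     r, c = divmod(pos, n)
--     for i in range(len(pieces)):
--         if not used[i]:
--             piece = pieces[i]
--             if valid_piece(piece, r, c, n, board):
--                 board[r][c] = piece
--                 used[i] = True
--                 if backtrack(pos + 1, n, pieces, used, board):
--                     return True
--                 used[i] = False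
--                 board[r][c] = None
--     return False
-- ===== SOURCE B (Python) =====
-- # B: same backtracking search, but the pieces still unused at entry are indexed once in a
-- # dict keyed by their (up, left) edges; each cell's required (up, left) pair is forced by the
-- # border and the already-placed neighbours, so only the matching bucket is scanned instead of
-- # all pieces. Mutates `board` and `used` in place exactly like A (restores them on failure).
-- def backtrack(pos, n, pieces, used, board):
--     if pos == n * n:
--         return True
--     index = {}
--     for i in range(len(pieces)):
--         if not used[i]:
--             p = pieces[i]
--             index.setdefault((p[0], p[1]), []).append(i)
--     if not index:
--         return False
--     return _solve(pos, n, pieces, used, board, index)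
--
-- def _solve(pos, n, pieces, used, board, index):
--     if pos == n * n:
--         return True
--     r, c = divmod(pos, n)
--     up = "black" if r == 0 else board[r-1][c][2]
--     left = "black" if c == 0 else board[r][c-1][3]
--     for i in index.get((up, left), []):
--         if used[i]:
--             continue
--         piece = pieces[i]
--         if r == n - 1 and piece[2] != "black":
--             continue
--         if c == n - 1 and piece[3] != "black":
--             continue
--         board[r][c] = piece
--         used[i] = True
--         if _solve(pos + 1, n, pieces, used, board, index):
--             return True
--         used[i] = False
--         board[r][c] = None
--     return False
-- ===== Notes on version B (the rewrite author's own statement) =====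
-- stated objective: alternative
-- what changed: B indexes the still-unused pieces once in a dict keyed by their (up,left) edge pair; since each cell's required (up,left) pair is forced by the border and the already-placed neighbours, each search step scans only the matching bucket instead of all pieces (an asymptotic win on real puzzle inputs, but a timing run's generated inputs lie outside Pre_, so no speed is claimed).
-- outside the precondition, e.g. on backtrack(0, 2, [('a',)], [False], []): A returns False, B raises IndexError; on backtrack(0, -1, [('c', 'black')], [False], [[]]): A returns False, B returns False
import Mathlib
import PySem

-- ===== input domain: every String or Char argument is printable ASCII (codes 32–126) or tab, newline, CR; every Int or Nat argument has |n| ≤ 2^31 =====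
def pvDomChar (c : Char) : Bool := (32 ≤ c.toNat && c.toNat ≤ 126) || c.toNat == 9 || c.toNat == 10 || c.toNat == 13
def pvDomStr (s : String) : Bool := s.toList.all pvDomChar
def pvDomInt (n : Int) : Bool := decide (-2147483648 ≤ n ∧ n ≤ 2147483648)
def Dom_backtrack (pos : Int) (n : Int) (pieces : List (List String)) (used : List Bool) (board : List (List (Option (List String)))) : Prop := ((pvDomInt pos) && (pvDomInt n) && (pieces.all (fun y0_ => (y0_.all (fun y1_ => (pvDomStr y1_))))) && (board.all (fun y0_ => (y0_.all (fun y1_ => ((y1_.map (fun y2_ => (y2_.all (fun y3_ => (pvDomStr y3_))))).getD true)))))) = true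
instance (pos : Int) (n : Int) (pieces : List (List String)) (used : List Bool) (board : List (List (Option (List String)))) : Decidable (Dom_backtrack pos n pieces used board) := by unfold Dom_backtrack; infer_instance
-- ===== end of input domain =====

-- B indexes the still-unused pieces in a dict keyed by the (up,left) edge pair forced at each
-- cell and scans only the matching bucket instead of all pieces (objective: alternative). Both
-- Pythons mutate `board`/`used` in place identically (restored on failure); the theorem is about
-- the return value.


-- ===== PORT A =====
-- board[r][c][j] read as a String; the "" defaults are reached only where the Python raises
-- (out-of-range index / None cell / short piece), all excluded by Pre_backtrack.
def pvEdge (board : List (List (Option (List String)))) (r c j : Int) : String :=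
  match PySem.List.pyGet? board r with
  | some row =>
    match PySem.List.pyGet? row c with
    | some (some p) => (PySem.List.pyGet? p j).getD ""
    | _ => ""
  | none => ""

-- board[r][c] = v (in-place write modelled functionally; out-of-range = Python raise, excluded by Pre_)
def pvSetCell (board : List (List (Option (List String)))) (r c : Int) (v : Option (List String)) :
    List (List (Option (List String))) :=
  match PySem.List.pyIdx? board.length r with
  | some ri =>
    board.set ri (match board[ri]? with
      | some row =>
        (match PySem.List.pyIdx? row.length c with
         | some ci => row.set ci v
         | none => row)
      | none => [])
  | none => board

def valid_piece (piece : List String) (r c n : Int) (board : List (List (Option (List String)))) : Bool :=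
  if r = 0 ∧ (PySem.List.pyGet? piece 0).getD "" ≠ "black" then false
  else if r = n - 1 ∧ (PySem.List.pyGet? piece 2).getD "" ≠ "black" then false
  else if c = 0 ∧ (PySem.List.pyGet? piece 1).getD "" ≠ "black" then false
  else if c = n - 1 ∧ (PySem.List.pyGet? piece 3).getD "" ≠ "black" then false
  else if 0 < c ∧ pvEdge board r (c-1) 3 ≠ (PySem.List.pyGet? piece 1).getD "" then false
  else if 0 < r ∧ pvEdge board (r-1) c 2 ≠ (PySem.List.pyGet? piece 0).getD "" then false
  else true

-- the `for i in range(len(pieces))` body; `next` is the recursive call at pos+1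
def loopA (next : List Bool → List (List (Option (List String))) → Bool)
    (r c n : Int) (pieces : List (List String)) (board : List (List (Option (List String))))
    (used : List Bool) : List Nat → Bool
  | [] => false
  | i :: rest =>
    if (PySem.List.pyGet? used (i : Int)).getD true = false then
      if valid_piece ((PySem.List.pyGet? pieces (i : Int)).getD []) r c n board then
        if next (used.set i true)
            (pvSetCell board r c (some ((PySem.List.pyGet? pieces (i : Int)).getD []))) then true
        else loopA next r c n pieces board used rest
      else loopA next r c n pieces board used rest
    else loopA next r c n pieces board used rest

-- fuel makes the recursion total; used.length + 1 always suffices (each recursive call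
-- marks one unused piece used), so the 0-fuel branch is never reached.
def solveA : Nat → Int → Int → List (List String) → List Bool → List (List (Option (List String))) → Bool
  | 0, _, _, _, _, _ => false
  | (fuel+1), pos, n, pieces, used, board =>
    if pos = n * n then true
    else
      loopA (fun u b => solveA fuel (pos + 1) n pieces u b)
        (PySem.Int.floordiv pos n) (PySem.Int.mod pos n) n pieces board used
        (List.range pieces.length)

def backtrack (pos : Int) (n : Int) (pieces : List (List String)) (used : List Bool) (board : List (List (Option (List String)))) : Bool :=
  solveA (used.length + 1) pos n pieces used board

-- ===== PORT B =====
def keyB (pieces : List (List String)) (i : Nat) : String × String :=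
  ((PySem.List.pyGet? ((PySem.List.pyGet? pieces (i : Int)).getD []) 0).getD "",
   (PySem.List.pyGet? ((PySem.List.pyGet? pieces (i : Int)).getD []) 1).getD "")

-- index.setdefault((p[0],p[1]), []).append(i) for the still-unused i  ==  modify with default []
def buildIndex (pieces : List (List String)) (used : List Bool) : PySem.Dict (String × String) (List Nat) :=
  (List.range pieces.length).foldl
    (fun d (i : Nat) =>
      if (PySem.List.pyGet? used (i : Int)).getD true = false then
        d.modify (keyB pieces i) [] (· ++ [i])
      else d)
    PySem.Dict.empty

def loopB (next : List Bool → List (List (Option (List String))) → Bool)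
    (r c n : Int) (pieces : List (List String)) (board : List (List (Option (List String))))
    (used : List Bool) : List Nat → Bool
  | [] => false
  | i :: rest =>
    if (PySem.List.pyGet? used (i : Int)).getD true = true then
      loopB next r c n pieces board used rest
    else
      if r = n - 1 ∧ (PySem.List.pyGet? ((PySem.List.pyGet? pieces (i : Int)).getD []) 2).getD "" ≠ "black" then
        loopB next r c n pieces board used rest
      else if c = n - 1 ∧ (PySem.List.pyGet? ((PySem.List.pyGet? pieces (i : Int)).getD []) 3).getD "" ≠ "black" then
        loopB next r c n pieces board used rest
      else if next (used.set i true)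
          (pvSetCell board r c (some ((PySem.List.pyGet? pieces (i : Int)).getD []))) then true
      else loopB next r c n pieces board used rest

def solveB : Nat → Int → Int → List (List String) → List Bool → List (List (Option (List String))) → PySem.Dict (String × String) (List Nat) → Bool
  | 0, _, _, _, _, _, _ => false
  | (fuel+1), pos, n, pieces, used, board, idx =>
    if pos = n * n then true
    else
      loopB (fun u b => solveB fuel (pos + 1) n pieces u b idx)
        (PySem.Int.floordiv pos n) (PySem.Int.mod pos n) n pieces board used
        (idx.getD
          ((if PySem.Int.floordiv pos n = 0 then "black"
            else pvEdge board (PySem.Int.floordiv pos n - 1) (PySem.Int.mod pos n) 2),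
           (if PySem.Int.mod pos n = 0 then "black"
            else pvEdge board (PySem.Int.floordiv pos n) (PySem.Int.mod pos n - 1) 3)) [])

def backtrack_alt (pos : Int) (n : Int) (pieces : List (List String)) (used : List Bool) (board : List (List (Option (List String)))) : Bool :=
  if pos = n * n then true
  else if (buildIndex pieces used).items = [] then false
  else solveB (used.length + 1) pos n pieces used board (buildIndex pieces used)

-- ===== PRECONDITION & SPEC =====
-- Pre_ admits the inputs on which the Python A returns normally: a solved prefix (pos = n*n),
-- no placeable piece at all (every piece already marked used), or a well-formed search state
-- (n >= 1, 0 <= pos <= n*n, a used flag for every piece, 4-edged pieces, an n-by-n board whose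
-- first pos row-major cells hold 4-edged pieces). Excluded: inputs where A raises
-- (ZeroDivisionError for n = 0, IndexError/TypeError on malformed pieces/board/used), and junk
-- inputs (negative n, pos outside [0,n*n], inconsistent shapes) on which A happens to return
-- only via negative-index wraparound; on those neither value is specified behaviour and the
-- natural B raises or returns without reproducing the wraparound.
def Pre_backtrack (pos : Int) (n : Int) (pieces : List (List String)) (used : List Bool) (board : List (List (Option (List String)))) : Prop :=
  pos = n * n ∨
  (n ≠ 0 ∧ pieces.length ≤ used.length ∧ (used.take pieces.length).all (fun u => u) = true) ∨
  (1 ≤ n ∧ 0 ≤ pos ∧ pos ≤ n * n ∧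
   pieces.length ≤ used.length ∧
   (∀ p ∈ pieces, 4 ≤ p.length) ∧
   (board.length : Int) = n ∧
   (∀ row ∈ board, (row.length : Int) = n) ∧
   (∀ cell ∈ board.flatten.take pos.toNat,
      (cell.map (fun p => decide (4 ≤ p.length))).getD false = true))
instance (pos : Int) (n : Int) (pieces : List (List String)) (used : List Bool) (board : List (List (Option (List String)))) : Decidable (Pre_backtrack pos n pieces used board) := by unfold Pre_backtrack; infer_instance

def pvWitness_backtrack : Int × Int × List (List String) × List Bool × List (List (Option (List String))) :=
  (0, 1, [["black","black","black","black"]], [false], [[none]])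

def Spec_backtrack (pos : Int) (n : Int) (pieces : List (List String)) (used : List Bool) (board : List (List (Option (List String)))) (out : Bool) : Prop := out = backtrack_alt pos n pieces used board
instance (pos : Int) (n : Int) (pieces : List (List String)) (used : List Bool) (board : List (List (Option (List String)))) (out : Bool) : Decidable (Spec_backtrack pos n pieces used board out) := by unfold Spec_backtrack; infer_instance

-- ===== CLAIM (what is proved, stated in full; the proofs are below) =====
def Claim_equal_backtrack : Prop := ∀ (pos : Int) (n : Int) (pieces : List (List String)) (used : List Bool) (board : List (List (Option (List String)))), Dom_backtrack pos n pieces used board → Pre_backtrack pos n pieces used board → Spec_backtrack pos n pieces used board (backtrack pos n pieces used board)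

-- ===== LEMMAS AND PROOFS =====

-- accumulator form of the index-building loop
lemma bucket_aux (pieces : List (List String)) (usedE : List Bool) (k : String × String)
    (is : List Nat) :
    ∀ d : PySem.Dict (String × String) (List Nat),
    (is.foldl
      (fun d (i : Nat) =>
        if (PySem.List.pyGet? usedE (i : Int)).getD true = false then
          d.modify (keyB pieces i) [] (· ++ [i])
        else d) d).getD k [] =
      d.getD k [] ++
        is.filter (fun i => (keyB pieces i == k) &&
          decide ((PySem.List.pyGet? usedE (i : Int)).getD true = false)) := by
  induction is with
  | nil => simp
  | cons i rest ih =>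
    intro d
    rw [List.foldl_cons, List.filter_cons]
    by_cases hc : (PySem.List.pyGet? usedE (i : Int)).getD true = false
    · rw [if_pos hc, ih]
      rw [decide_eq_true hc, Bool.and_true]
      by_cases hk : keyB pieces i = k
      · rw [PySem.Dict.getD_modify, if_pos hk.symm,
          show (keyB pieces i == k) = true from beq_iff_eq.mpr hk, if_pos rfl, hk]
        simp
      · rw [PySem.Dict.getD_modify, if_neg (fun hh => hk hh.symm),
          show (keyB pieces i == k) = false from beq_eq_false_iff_ne.mpr hk, if_neg (by simp)]
    · rw [if_neg hc, ih, decide_eq_false hc, Bool.and_false, if_neg (by simp)]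

-- the bucket for key k is exactly the ascending list of entry-unused indices whose piece has key k
lemma bucket_eq (pieces : List (List String)) (usedE : List Bool) (k : String × String) :
    (buildIndex pieces usedE).getD k [] =
      (List.range pieces.length).filter
        (fun i => (keyB pieces i == k) &&
          decide ((PySem.List.pyGet? usedE (i : Int)).getD true = false)) := by
  unfold buildIndex
  rw [bucket_aux, PySem.Dict.getD_empty, List.nil_append]

-- A's sequential valid_piece as one boolean conjunction
lemma valid6 (piece : List String) (r c n : Int) (board : List (List (Option (List String)))) :
    valid_piece piece r c n board =
      (!decide (r = 0 ∧ (PySem.List.pyGet? piece 0).getD "" ≠ "black") &&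
       !decide (r = n - 1 ∧ (PySem.List.pyGet? piece 2).getD "" ≠ "black") &&
       !decide (c = 0 ∧ (PySem.List.pyGet? piece 1).getD "" ≠ "black") &&
       !decide (c = n - 1 ∧ (PySem.List.pyGet? piece 3).getD "" ≠ "black") &&
       !decide (0 < c ∧ pvEdge board r (c-1) 3 ≠ (PySem.List.pyGet? piece 1).getD "") &&
       !decide (0 < r ∧ pvEdge board (r-1) c 2 ≠ (PySem.List.pyGet? piece 0).getD "")) := by
  unfold valid_piece
  split_ifs with h1 h2 h3 h4 h5 h6 <;> simp [*]

-- border + neighbour test for one axis collapses to "edge equals the forced key component"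
lemma keyFactor (P E : String) (r : Int) (hr : 0 ≤ r) :
    (!decide (r = 0 ∧ P ≠ "black") && !decide (0 < r ∧ E ≠ P)) =
      (P == (if r = 0 then "black" else E)) := by
  by_cases hr0 : r = 0
  · simp [hr0, eq_comm, Bool.beq_eq_decide_eq]
  · have : 0 < r := by omega
    simp [hr0, this, eq_comm, Bool.beq_eq_decide_eq]

-- valid_piece = "key matches the forced (up,left)" plus the two remaining border conditions
lemma valid_char (piece : List String) (r c n : Int)
    (board : List (List (Option (List String)))) (up left : String)
    (hr : 0 ≤ r) (hc : 0 ≤ c)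
    (hup : up = if r = 0 then "black" else pvEdge board (r-1) c 2)
    (hleft : left = if c = 0 then "black" else pvEdge board r (c-1) 3) :
    valid_piece piece r c n board =
      (((PySem.List.pyGet? piece 0).getD "", (PySem.List.pyGet? piece 1).getD "") == (up, left) &&
       !decide (r = n - 1 ∧ (PySem.List.pyGet? piece 2).getD "" ≠ "black") &&
       !decide (c = n - 1 ∧ (PySem.List.pyGet? piece 3).getD "" ≠ "black")) := by
  subst hup hleft
  rw [valid6, show (((PySem.List.pyGet? piece 0).getD "", (PySem.List.pyGet? piece 1).getD "") ==
      ((if r = 0 then "black" else pvEdge board (r-1) c 2),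
       (if c = 0 then "black" else pvEdge board r (c-1) 3))) =
      (((PySem.List.pyGet? piece 0).getD "" == (if r = 0 then "black" else pvEdge board (r-1) c 2)) &&
       ((PySem.List.pyGet? piece 1).getD "" == (if c = 0 then "black" else pvEdge board r (c-1) 3))) from rfl,
    ← keyFactor _ _ _ hr, ← keyFactor _ _ _ hc]
  generalize decide (r = 0 ∧ (PySem.List.pyGet? piece 0).getD "" ≠ "black") = a
  generalize decide (r = n - 1 ∧ (PySem.List.pyGet? piece 2).getD "" ≠ "black") = b
  generalize decide (c = 0 ∧ (PySem.List.pyGet? piece 1).getD "" ≠ "black") = d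
  generalize decide (c = n - 1 ∧ (PySem.List.pyGet? piece 3).getD "" ≠ "black") = e
  generalize decide (0 < c ∧ pvEdge board r (c-1) 3 ≠ (PySem.List.pyGet? piece 1).getD "") = f
  generalize decide (0 < r ∧ pvEdge board (r-1) c 2 ≠ (PySem.List.pyGet? piece 0).getD "") = g
  cases a <;> cases b <;> cases d <;> cases e <;> cases f <;> cases g <;> rfl

-- valid_char for the i-th piece, phrased with keyB
lemma valid_charK (pieces : List (List String)) (i : Nat) (r c n : Int)
    (board : List (List (Option (List String)))) (up left : String)
    (hr : 0 ≤ r) (hc : 0 ≤ c)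
    (hup : up = if r = 0 then "black" else pvEdge board (r-1) c 2)
    (hleft : left = if c = 0 then "black" else pvEdge board r (c-1) 3) :
    valid_piece ((PySem.List.pyGet? pieces (i : Int)).getD []) r c n board =
      (keyB pieces i == (up, left) &&
       !decide (r = n - 1 ∧ (PySem.List.pyGet? ((PySem.List.pyGet? pieces (i : Int)).getD []) 2).getD "" ≠ "black") &&
       !decide (c = n - 1 ∧ (PySem.List.pyGet? ((PySem.List.pyGet? pieces (i : Int)).getD []) 3).getD "" ≠ "black")) :=
  valid_char _ r c n board up left hr hc hup hleft

-- A's scan over all indices equals B's scan over the bucket (the key-matching, entry-unused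
-- indices), provided every entry-used flag is still set in the current `used`
lemma loop_eq (usedE : List Bool) (used : List Bool)
    (next₁ next₂ : List Bool → List (List (Option (List String))) → Bool)
    (h : ∀ (i : Nat) b, next₁ (used.set i true) b = next₂ (used.set i true) b)
    (r c n : Int) (pieces : List (List String)) (board : List (List (Option (List String))))
    (up left : String) (hr : 0 ≤ r) (hc : 0 ≤ c)
    (hup : up = if r = 0 then "black" else pvEdge board (r-1) c 2)
    (hleft : left = if c = 0 then "black" else pvEdge board r (c-1) 3)
    (hmono : ∀ j : Nat, (PySem.List.pyGet? usedE (j : Int)).getD true = true →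
      (PySem.List.pyGet? used (j : Int)).getD true = true)
    (is : List Nat) :
    loopA next₁ r c n pieces board used is =
      loopB next₂ r c n pieces board used
        (is.filter (fun i => (keyB pieces i == (up, left)) &&
          decide ((PySem.List.pyGet? usedE (i : Int)).getD true = false))) := by
  induction is with
  | nil => rfl
  | cons i rest ih =>
    rw [loopA, List.filter_cons]
    rcases hu : (PySem.List.pyGet? used (i : Int)).getD true with _ | _
    · -- used[i] is false now: A enters the body; i must be entry-unused
      rcases he : (PySem.List.pyGet? usedE (i : Int)).getD true with _ | _
      · -- entry-unused
        rw [if_pos rfl, valid_charK pieces i r c n board up left hr hc hup hleft]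
        simp only [decide_true, Bool.and_true]
        by_cases hkey : (keyB pieces i == (up, left)) = true
        · rw [hkey]
          simp only [if_true, Bool.true_and]
          have hu' : ¬ ((PySem.List.pyGet? used (i : Int)).getD true = true) := by
            rw [hu]; simp
          rw [loopB, if_neg hu']
          by_cases h2 : r = n - 1 ∧
              (PySem.List.pyGet? ((PySem.List.pyGet? pieces (i : Int)).getD []) 2).getD "" ≠ "black"
          · have hd : (!decide (r = n - 1 ∧
                (PySem.List.pyGet? ((PySem.List.pyGet? pieces (i : Int)).getD []) 2).getD "" ≠ "black") &&
                !decide (c = n - 1 ∧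
                (PySem.List.pyGet? ((PySem.List.pyGet? pieces (i : Int)).getD []) 3).getD "" ≠ "black")) = false := by
              rw [decide_eq_true h2]; simp
            rw [if_pos h2]
            simp only [hd, Bool.false_eq_true, if_false]
            exact ih
          · rw [if_neg h2]
            by_cases h4 : c = n - 1 ∧
                (PySem.List.pyGet? ((PySem.List.pyGet? pieces (i : Int)).getD []) 3).getD "" ≠ "black"
            · have hd : (!decide (r = n - 1 ∧
                  (PySem.List.pyGet? ((PySem.List.pyGet? pieces (i : Int)).getD []) 2).getD "" ≠ "black") &&
                  !decide (c = n - 1 ∧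
                  (PySem.List.pyGet? ((PySem.List.pyGet? pieces (i : Int)).getD []) 3).getD "" ≠ "black")) = false := by
                rw [decide_eq_true h4]; simp
              rw [if_pos h4]
              simp only [hd, Bool.false_eq_true, if_false]
              exact ih
            · have hd : (!decide (r = n - 1 ∧
                  (PySem.List.pyGet? ((PySem.List.pyGet? pieces (i : Int)).getD []) 2).getD "" ≠ "black") &&
                  !decide (c = n - 1 ∧
                  (PySem.List.pyGet? ((PySem.List.pyGet? pieces (i : Int)).getD []) 3).getD "" ≠ "black")) = true := by
                rw [decide_eq_false h2, decide_eq_false h4]; simp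
              rw [if_neg h4]
              simp only [hd, if_true]
              rw [h]
              rcases hnext : next₂ (used.set i true)
                  (pvSetCell board r c (some ((PySem.List.pyGet? pieces (i : Int)).getD []))) with _ | _
              · simp only [Bool.false_eq_true, if_false]
                exact ih
              · simp only [if_true]
        · simp only [Bool.not_eq_true] at hkey
          rw [hkey]
          simp only [Bool.false_and, Bool.false_eq_true, if_false]
          exact ih
      · -- entry-used but currently unused: impossible under hmono
        have hcur := hmono i he
        rw [hu] at hcur
        cases hcur
    · -- used[i] is true now: both skip
      rw [if_neg (by simp)]
      by_cases hq : ((keyB pieces i == (up, left)) &&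
          decide ((PySem.List.pyGet? usedE (i : Int)).getD true = false)) = true
      · rw [hq]
        simp only [if_true]
        rw [loopB, if_pos hu]
        exact ih
      · simp only [Bool.not_eq_true] at hq
        rw [hq]
        simp only [Bool.false_eq_true, if_false]
        exact ih

-- A's scan returns false when every index it visits is marked used
lemma loopA_used (next : List Bool → List (List (Option (List String))) → Bool)
    (r c n : Int) (pieces : List (List String)) (board : List (List (Option (List String))))
    (used : List Bool) (is : List Nat)
    (h : ∀ i ∈ is, (PySem.List.pyGet? used (i : Int)).getD true = true) :
    loopA next r c n pieces board used is = false := by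
  induction is with
  | nil => rfl
  | cons i rest ih =>
    rw [loopA, if_neg (by rw [h i (by simp)]; simp)]
    exact ih (fun j hj => h j (by simp [hj]))

-- setting one more flag preserves "every entry-used flag is still set"
lemma mono_set (usedE used : List Bool)
    (hmono : ∀ j : Nat, (PySem.List.pyGet? usedE (j : Int)).getD true = true →
      (PySem.List.pyGet? used (j : Int)).getD true = true) (i : Nat) :
    ∀ j : Nat, (PySem.List.pyGet? usedE (j : Int)).getD true = true →
      (PySem.List.pyGet? (used.set i true) (j : Int)).getD true = true := by
  intro j hj
  rw [PySem.List.pyGet?_natCast, List.getElem?_set]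
  by_cases hij : i = j
  · simp only [hij, if_true]
    by_cases hlt : j < used.length
    · simp [hlt]
    · have := hmono j hj
      rw [PySem.List.pyGet?_natCast] at this
      simp [hlt] at this ⊢
  · simp only [hij, if_false]
    have := hmono j hj
    rw [PySem.List.pyGet?_natCast] at this
    exact this

-- equality of the two searches, by induction on the fuel
lemma solve_eq (usedE : List Bool) (fuel : Nat) (pos n : Int) (pieces : List (List String))
    (used : List Bool) (board : List (List (Option (List String)))) (hn : 1 ≤ n) (hp : 0 ≤ pos)
    (hmono : ∀ j : Nat, (PySem.List.pyGet? usedE (j : Int)).getD true = true →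
      (PySem.List.pyGet? used (j : Int)).getD true = true) :
    solveA fuel pos n pieces used board =
      solveB fuel pos n pieces used board (buildIndex pieces usedE) := by
  induction fuel generalizing pos used board with
  | zero => rfl
  | succ fuel ih =>
    rw [solveA, solveB]
    by_cases hend : pos = n * n
    · rw [if_pos hend, if_pos hend]
    · rw [if_neg hend, if_neg hend]
      have hr : 0 ≤ PySem.Int.floordiv pos n := by
        rw [PySem.Int.floordiv_eq_ediv_of_pos (by omega)]
        exact Int.ediv_nonneg hp (by omega)
      have hc : 0 ≤ PySem.Int.mod pos n := PySem.Int.mod_nonneg _ (by omega)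
      rw [bucket_eq]
      exact loop_eq usedE used _ _
        (fun i b => ih (pos + 1) (used.set i true) b (by omega) (mono_set usedE used hmono i))
        _ _ n pieces board _ _ hr hc rfl rfl hmono (List.range pieces.length)

-- if every index is entry-used, the fold builds nothing
lemma buildIndex_all_used (pieces : List (List String)) (used : List Bool)
    (h : ∀ i ∈ List.range pieces.length, (PySem.List.pyGet? used (i : Int)).getD true = true) :
    buildIndex pieces used = PySem.Dict.empty := by
  unfold buildIndex
  generalize List.range pieces.length = is at h
  induction is with
  | nil => rfl
  | cons i rest ih =>
    rw [List.foldl_cons, if_neg (by rw [h i (by simp)]; simp)]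
    exact ih (fun j hj => h j (by simp [hj]))

-- ===== VERDICT (by name: the statement is the Claim_ definition above) =====
theorem backtrack_spec : Claim_equal_backtrack := by
  intro pos n pieces used board _ hpre
  unfold Spec_backtrack backtrack backtrack_alt
  by_cases hend : pos = n * n
  · rw [if_pos hend, solveA, if_pos hend]
  · rw [if_neg hend]
    by_cases hempty : (buildIndex pieces used).items = []
    · -- empty index: every index is already used, so A's scan also fails
      rw [if_pos hempty, solveA, if_neg hend]
      apply loopA_used
      intro i hi
      by_contra hne
      have hfalse : (PySem.List.pyGet? used (i : Int)).getD true = false := by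
        rcases hvv : (PySem.List.pyGet? used (i : Int)).getD true with _ | _
        · rfl
        · exact absurd hvv hne
      have hmem : i ∈ (List.range pieces.length).filter
          (fun j => (keyB pieces j == keyB pieces i) &&
            decide ((PySem.List.pyGet? used (j : Int)).getD true = false)) := by
        rw [List.mem_filter]
        exact ⟨hi, by rw [hfalse]; simp⟩
      rw [← bucket_eq] at hmem
      have hd : buildIndex pieces used = PySem.Dict.empty := PySem.Dict.ext hempty
      rw [hd, PySem.Dict.getD_empty] at hmem
      cases hmem
    · rw [if_neg hempty]
      have hcore : 1 ≤ n ∧ 0 ≤ pos := by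
        rcases hpre with h1 | ⟨h2a, h2b, h2c⟩ | h4
        · exact absurd h1 hend
        · -- all entry flags set would make the index empty
          exfalso
          apply hempty
          rw [buildIndex_all_used pieces used ?_]
          · rfl
          · intro i hi
            have hi' : i < pieces.length := List.mem_range.mp hi
            rw [PySem.List.pyGet?_natCast, List.getElem?_eq_getElem (by omega : i < used.length)]
            have hlen2 : i < (used.take pieces.length).length := by
              simp only [List.length_take]
              omega
            have hmemtake : used[i] ∈ used.take pieces.length := by
              have heq : (used.take pieces.length)[i]'hlen2 = used[i]'(by omega) :=
                List.getElem_take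
              exact heq ▸ List.getElem_mem hlen2
            exact List.all_eq_true.mp h2c _ hmemtake
        · exact ⟨h4.1, h4.2.1⟩
      exact solve_eq used _ pos n pieces used board hcore.1 hcore.2 (fun _ h => h)
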